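-- pv_equiv track=rewrite | github.com/hydroo/coding-and-math-exercises | 66_3.py | rationalFromContinuedFraction
-- ===== SOURCE A (Python) =====
-- def rationalFromContinuedFraction(chain) :
--
-- 	numerator = 1
-- 	denominator = chain[len(chain)-1]
--
-- 	i = len(chain)-1
-- 	while i > 0 :
--
-- 		newDenominator = chain[i-1]*denominator+numerator
-- 		newNumerator = denominator
--
-- 		denominator = newDenominator
-- 		numerator = newNumerator
--
-- 		i -= 1
--
-- 	return denominator, numerator
-- ===== SOURCE B (Python) =====
-- def rationalFromContinuedFraction(chain):
--     # forward convergent recurrence: h_k = a_k*h_{k-1} + h_{k-2}, same for k_k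
--     p, p_prev = chain[0], 1
--     q, q_prev = 1, 0
--     for a in chain[1:]:
--         p, p_prev = a * p + p_prev, p
--         q, q_prev = a * q + q_prev, q
--     return p, q
-- ===== Notes on version B (the rewrite author's own statement) =====
-- stated objective: alternative
-- what changed: Replaces A's back-to-front while loop updating one numerator/denominator pair with the classical front-to-back two-term convergent recurrence (p = a*p + p_prev, q = a*q + q_prev) over the tail of the chain.
import Mathlib
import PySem

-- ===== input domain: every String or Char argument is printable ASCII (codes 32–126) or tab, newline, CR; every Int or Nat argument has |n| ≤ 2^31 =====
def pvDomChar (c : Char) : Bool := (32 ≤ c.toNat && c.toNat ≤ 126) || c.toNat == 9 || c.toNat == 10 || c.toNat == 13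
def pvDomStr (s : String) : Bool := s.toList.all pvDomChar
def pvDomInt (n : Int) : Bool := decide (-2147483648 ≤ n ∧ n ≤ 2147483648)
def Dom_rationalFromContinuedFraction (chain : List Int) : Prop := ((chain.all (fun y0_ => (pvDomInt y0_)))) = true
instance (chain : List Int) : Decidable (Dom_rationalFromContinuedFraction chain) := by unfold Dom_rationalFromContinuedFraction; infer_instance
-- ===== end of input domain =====

-- B re-implements A's back-to-front single-pair while loop as the classical front-to-back
-- two-term convergent recurrence; equivalence proved on non-empty chains (both raise on []).

-- ===== PORT A =====
-- the while loop: counter i, state (numerator, denominator); indices i-1 are in range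
-- whenever i ≤ chain.length, so List.getD is exact for Python's chain[i-1] here.
def pvALoop (chain : List Int) : Nat → Int → Int → Int × Int
  | 0, numerator, denominator => (denominator, numerator)
  | i + 1, numerator, denominator =>
      pvALoop chain i denominator (chain.getD i 0 * denominator + numerator)

def rationalFromContinuedFraction (chain : List Int) : Int × Int :=
  -- chain[len(chain)-1]: in range iff chain ≠ [] (Pre_ excludes []; Python raises IndexError there)
  let denominator := chain.getD (chain.length - 1) 0
  pvALoop chain (chain.length - 1) 1 denominator

-- ===== PORT B =====
-- one step of the forward recurrence on state ((p, p_prev), (q, q_prev))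
def pvBStep (s : (Int × Int) × (Int × Int)) (a : Int) : (Int × Int) × (Int × Int) :=
  ((a * s.1.1 + s.1.2, s.1.1), (a * s.2.1 + s.2.2, s.2.1))

def rationalFromContinuedFraction_alt (chain : List Int) : Int × Int :=
  match chain with
  | [] => (0, 0)   -- Python B raises IndexError (chain[0]) here; excluded by Pre_
  | a :: rest =>
      let s := rest.foldl pvBStep ((a, 1), (1, 0))
      (s.1.1, s.2.1)

-- ===== PRECONDITION & SPEC =====
-- Both A and B raise IndexError on the empty chain; Pre_ excludes exactly that input.
def Pre_rationalFromContinuedFraction (chain : List Int) : Prop := chain ≠ []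
instance (chain : List Int) : Decidable (Pre_rationalFromContinuedFraction chain) := by unfold Pre_rationalFromContinuedFraction; infer_instance
def pvWitness_rationalFromContinuedFraction : List Int := [2, 3, 4]

def Spec_rationalFromContinuedFraction (chain : List Int) (out : Int × Int) : Prop := out = rationalFromContinuedFraction_alt chain
instance (chain : List Int) (out : Int × Int) : Decidable (Spec_rationalFromContinuedFraction chain out) := by unfold Spec_rationalFromContinuedFraction; infer_instance

-- ===== CLAIM (what is proved, stated in full; the proofs are below) =====
def Claim_equal_rationalFromContinuedFraction : Prop := ∀ (chain : List Int), Dom_rationalFromContinuedFraction chain → Pre_rationalFromContinuedFraction chain → Spec_rationalFromContinuedFraction chain (rationalFromContinuedFraction chain)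

-- ===== LEMMAS AND PROOFS =====

-- proof-side helper: the back-to-front recursion both programs compute (continuant pair)
def pvRec : List Int → Int × Int
  | [] => (0, 0)
  | [a] => (a, 1)
  | a :: rest => (a * (pvRec rest).1 + (pvRec rest).2, (pvRec rest).1)

-- proof-side helper: the 2×2 continuant matrix M(l) = ∏ [[a,1],[1,0]], built back-to-front
def pvM : List Int → (Int × Int) × (Int × Int)
  | [] => ((1, 0), (0, 1))
  | a :: t =>
      ((a * (pvM t).1.1 + (pvM t).2.1, a * (pvM t).1.2 + (pvM t).2.2),
       ((pvM t).1.1, (pvM t).1.2))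

-- peeling the first element off the chain commutes with A's loop
theorem pvALoop_cons (a : Int) (rest : List Int) (i : Nat) (num den : Int) :
    pvALoop (a :: rest) (i + 1) num den =
      (a * (pvALoop rest i num den).1 + (pvALoop rest i num den).2,
       (pvALoop rest i num den).1) := by
  induction i generalizing num den with
  | zero => simp [pvALoop]
  | succ i ih =>
      show pvALoop (a :: rest) (i + 1) den ((a :: rest).getD (i + 1) 0 * den + num) = _
      rw [ih]
      simp [pvALoop, List.getD]

-- A equals the back-to-front recursion
theorem pvA_eq_rec (chain : List Int) (h : chain ≠ []) :
    rationalFromContinuedFraction chain = pvRec chain := by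
  induction chain with
  | nil => exact absurd rfl h
  | cons a rest ih =>
      cases rest with
      | nil => simp [rationalFromContinuedFraction, pvALoop, pvRec]
      | cons b t =>
          have hr : (b :: t : List Int) ≠ [] := by simp
          have := ih hr
          simp only [rationalFromContinuedFraction, List.length_cons] at this ⊢
          have hlen : (t.length + 1 + 1 : Nat) - 1 = (t.length + 1 - 1) + 1 := rfl
          rw [hlen, pvALoop_cons]
          have hget : (a :: b :: t : List Int).getD ((t.length + 1 - 1) + 1) 0
              = (b :: t : List Int).getD (t.length + 1 - 1) 0 := by
            simp only [List.getD, List.getElem?_cons_succ]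
          rw [hget, this]
          rfl

-- B's fold computes (state row vector) · M(l)
theorem pvB_fold (l : List Int) (p pp q qp : Int) :
    l.foldl pvBStep ((p, pp), (q, qp)) =
      ((p * (pvM l).1.1 + pp * (pvM l).2.1, p * (pvM l).1.2 + pp * (pvM l).2.2),
       (q * (pvM l).1.1 + qp * (pvM l).2.1, q * (pvM l).1.2 + qp * (pvM l).2.2)) := by
  induction l generalizing p pp q qp with
  | nil => simp [pvM]
  | cons a t ih =>
      show t.foldl pvBStep (pvBStep ((p, pp), (q, qp)) a) = _
      rw [show pvBStep ((p, pp), (q, qp)) a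
            = ((a * p + pp, p), (a * q + qp, q)) from rfl, ih]
      simp only [pvM, Prod.mk.injEq]
      exact ⟨⟨by ring, by ring⟩, by ring, by ring⟩

-- the back-to-front recursion is the first column of M
theorem pvRec_eq_M (l : List Int) (h : l ≠ []) :
    pvRec l = ((pvM l).1.1, (pvM l).2.1) := by
  induction l with
  | nil => exact absurd rfl h
  | cons a rest ih =>
      cases rest with
      | nil => simp [pvRec, pvM]
      | cons b t =>
          have := ih (by simp)
          simp only [pvRec, pvM, this]

-- B equals the back-to-front recursion
theorem pvB_eq_rec (chain : List Int) (h : chain ≠ []) :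
    rationalFromContinuedFraction_alt chain = pvRec chain := by
  cases chain with
  | nil => exact absurd rfl h
  | cons a rest =>
      show (let s := rest.foldl pvBStep ((a, 1), (1, 0)); ((s.1.1, s.2.1) : Int × Int)) = _
      rw [show (let s := rest.foldl pvBStep ((a, 1), (1, 0)); ((s.1.1, s.2.1) : Int × Int))
            = (((rest.foldl pvBStep ((a, 1), (1, 0))).1.1,
                (rest.foldl pvBStep ((a, 1), (1, 0))).2.1) : Int × Int) from rfl, pvB_fold]
      cases rest with
      | nil => simp [pvRec, pvM]
      | cons b t =>
          rw [show pvRec (a :: b :: t)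
                = (a * (pvRec (b :: t)).1 + (pvRec (b :: t)).2, (pvRec (b :: t)).1) from rfl,
              pvRec_eq_M (b :: t) (by simp)]
          simp

-- ===== VERDICT (by name: the statement is the Claim_ definition above) =====
theorem rationalFromContinuedFraction_spec : Claim_equal_rationalFromContinuedFraction := by
  intro chain _ hpre
  show rationalFromContinuedFraction chain = rationalFromContinuedFraction_alt chain
  rw [pvA_eq_rec chain hpre, pvB_eq_rec chain hpre]
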